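-- pv_equiv track=rewrite | github.com/yannickloth/W33-Theory | tools/fit_ce2_simple_family_sign_polynomial.py | _degree_histogram
-- ===== SOURCE A (Python) =====
-- from typing import Dict, Iterable, List, Tuple
--
-- def _degree_histogram(
--     monomial_masks: list[int], coeff_idx: Iterable[int]
-- ) -> dict[int, int]:
--     hist: dict[int, int] = {}
--     for idx in coeff_idx:
--         deg = int(monomial_masks[int(idx)]).bit_count()
--         hist[deg] = hist.get(deg, 0) + 1
--     return dict(sorted(hist.items()))
-- ===== SOURCE B (Python) =====
-- def _degree_histogram(monomial_masks, coeff_idx):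
--     # Sort the popcount degrees once, then run-length encode the sorted list:
--     # keys come out in ascending order automatically, no dict.get counting
--     # and no final sort of the items.
--     degs = sorted(int(monomial_masks[int(idx)]).bit_count() for idx in coeff_idx)
--     return dict(_runs(degs))
--
--
-- def _runs(degs):
--     # run-length encoding of an (already sorted) list
--     if not degs:
--         return []
--     d = degs[0]
--     k = 1
--     while k < len(degs) and degs[k] == d:
--         k += 1
--     return [(d, k)] + _runs(degs[k:])
-- ===== Notes on version B (the rewrite author's own statement) =====
-- stated objective: alternative
-- what changed: Replaces the dict.get counting loop plus final sort of items by sorting the degree list once and run-length encoding it, so the histogram keys come out in ascending order directly.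
import Mathlib
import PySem

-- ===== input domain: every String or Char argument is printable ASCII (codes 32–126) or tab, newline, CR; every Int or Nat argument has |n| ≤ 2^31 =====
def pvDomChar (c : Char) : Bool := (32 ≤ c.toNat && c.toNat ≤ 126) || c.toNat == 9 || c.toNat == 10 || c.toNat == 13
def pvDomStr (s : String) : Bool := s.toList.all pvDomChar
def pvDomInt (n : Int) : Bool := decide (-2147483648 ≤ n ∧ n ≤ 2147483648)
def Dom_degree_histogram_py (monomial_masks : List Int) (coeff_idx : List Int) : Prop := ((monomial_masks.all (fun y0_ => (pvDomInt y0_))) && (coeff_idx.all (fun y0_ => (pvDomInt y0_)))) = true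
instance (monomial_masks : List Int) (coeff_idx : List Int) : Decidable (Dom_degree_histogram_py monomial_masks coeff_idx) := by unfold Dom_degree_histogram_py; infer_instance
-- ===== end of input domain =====

-- B replaces A's dict.get counting loop + final item sort by sorting the degree
-- list once and run-length encoding it (alternative decomposition, same results).

-- `int(monomial_masks[int(idx)]).bit_count()` — shared by both Python sources verbatim.
-- xs[i] is PySem.List.pyGetD (default irrelevant: Pre_ puts the index in range).
def pvDeg (monomial_masks : List Int) (idx : Int) : Int :=
  ((PySem.Int.bitCount (PySem.List.pyGetD monomial_masks idx 0) : Nat) : Int)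

-- ===== PORT A =====
def degree_histogram_py (monomial_masks : List Int) (coeff_idx : List Int) : List (Int × Int) :=
  let hist := coeff_idx.foldl (fun (h : PySem.Dict Int Int) idx =>
      let deg := pvDeg monomial_masks idx
      h.insert deg (h.getD deg 0 + 1)) PySem.Dict.empty
  -- dict keys are pairwise distinct, so Python's tuple sort of hist.items() is
  -- exactly the sort by key (first component) — exact here.
  PySem.List.sorted hist.items (fun p => p.1) false

-- ===== PORT B =====
-- `_runs`: the leading run of elements equal to the head (the inner while loop)
-- is the takeWhile prefix; `degs[k:]` is the dropWhile remainder.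
def pvRuns : List Int → List (Int × Int)
  | [] => []
  | d :: rest =>
      let k := (rest.takeWhile (fun x => x == d)).length + 1
      (d, (k : Int)) :: pvRuns (rest.dropWhile (fun x => x == d))
  termination_by s => s.length
  decreasing_by
    simpa using Nat.lt_succ_of_le (List.length_dropWhile_le _ _)

def degree_histogram_py_alt (monomial_masks : List Int) (coeff_idx : List Int) : List (Int × Int) :=
  pvRuns (PySem.List.sorted (coeff_idx.map (fun idx => pvDeg monomial_masks idx)) (fun x => x) false)

-- ===== PRECONDITION & SPEC =====
-- Pre_ excludes exactly the inputs where Python raises IndexError: an index of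
-- coeff_idx outside [-len(monomial_masks), len(monomial_masks)).
def Pre_degree_histogram_py (monomial_masks : List Int) (coeff_idx : List Int) : Prop :=
  ∀ idx ∈ coeff_idx, PySem.Raise.InRange monomial_masks.length idx
instance (monomial_masks : List Int) (coeff_idx : List Int) : Decidable (Pre_degree_histogram_py monomial_masks coeff_idx) := by unfold Pre_degree_histogram_py; infer_instance
def pvWitness_degree_histogram_py : List Int × List Int := ([3, 5], [0, 1, -1])

def Spec_degree_histogram_py (monomial_masks : List Int) (coeff_idx : List Int) (out : List (Int × Int)) : Prop := out = degree_histogram_py_alt monomial_masks coeff_idx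
instance (monomial_masks : List Int) (coeff_idx : List Int) (out : List (Int × Int)) : Decidable (Spec_degree_histogram_py monomial_masks coeff_idx out) := by unfold Spec_degree_histogram_py; infer_instance

-- ===== CLAIM (what is proved, stated in full; the proofs are below) =====
def Claim_equal_degree_histogram_py : Prop := ∀ (monomial_masks : List Int) (coeff_idx : List Int), Dom_degree_histogram_py monomial_masks coeff_idx → Pre_degree_histogram_py monomial_masks coeff_idx → Spec_degree_histogram_py monomial_masks coeff_idx (degree_histogram_py monomial_masks coeff_idx)

-- ===== LEMMAS AND PROOFS =====

-- PySem.Set.ofList is the subsequence of first occurrences.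
lemma pv_ofList_sublist (xs : List Int) : (PySem.Set.ofList xs).Sublist xs := by
  induction xs with
  | nil => simp [PySem.Set.ofList_nil]
  | cons x xs ih =>
      rw [PySem.Set.ofList_cons]
      have hdsc : ((PySem.Set.ofList xs).discard x).Sublist (PySem.Set.ofList xs) := by
        simp only [PySem.Set.discard]; exact List.filter_sublist
      exact List.cons_sublist_cons.mpr (hdsc.trans ih)

lemma pv_discard_of_not_mem (r : List Int) (d : Int) (h : d ∉ r) :
    PySem.Set.discard r d = r := by
  simp only [PySem.Set.discard]
  apply List.filter_eq_self.mpr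
  intro a ha
  have hne : a ≠ d := fun he => h (he ▸ ha)
  simpa using hne

-- a constant run in front collapses to a single first occurrence
lemma pv_ofList_run (t r : List Int) (d : Int) (ht : ∀ x ∈ t, x = d) (hdr : d ∉ r) :
    PySem.Set.ofList (d :: (t ++ r)) = d :: PySem.Set.ofList r := by
  induction t with
  | nil =>
      rw [List.nil_append, PySem.Set.ofList_cons, pv_discard_of_not_mem _ _ (by simpa using hdr)]
  | cons a t' ih =>
      have ha : a = d := ht a (by simp)
      have ih' := ih (fun x hx => ht x (by simp [hx]))
      have hnm : d ∉ PySem.Set.ofList r := by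
        simpa [PySem.Set.mem_ofList] using hdr
      rw [ha, List.cons_append, PySem.Set.ofList_cons, ih']
      congr 1
      calc PySem.Set.discard (d :: PySem.Set.ofList r) d
          = PySem.Set.discard (PySem.Set.ofList r) d := by simp [PySem.Set.discard]
        _ = PySem.Set.ofList r := pv_discard_of_not_mem _ _ hnm

-- run-length encoding of a nondecreasing list = (first occurrences, counts)
lemma pv_runs_sorted (s : List Int) :
    s.Pairwise (· ≤ ·) →
    pvRuns s = (PySem.Set.ofList s).map (fun k => (k, (s.count k : Int))) := by
  induction s using pvRuns.induct with
  | case1 => intro _; simp [pvRuns, PySem.Set.ofList_nil]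
  | case2 d rest ih =>
      intro hs
      have hpc := List.pairwise_cons.mp hs
      have hd_le : ∀ x ∈ rest, d ≤ x := hpc.1
      have ht : ∀ x ∈ rest.takeWhile (fun x => x == d), x = d := by
        intro x hx
        simpa using List.mem_takeWhile_imp hx
      have hrest : rest.takeWhile (fun x => x == d) ++ rest.dropWhile (fun x => x == d) = rest :=
        List.takeWhile_append_dropWhile
      have hsubr : (rest.dropWhile (fun x => x == d)).Sublist rest := List.dropWhile_sublist _
      have hr_pair : (rest.dropWhile (fun x => x == d)).Pairwise (· ≤ ·) :=
        List.Pairwise.sublist hsubr hpc.2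
      have hdr : d ∉ rest.dropWhile (fun x => x == d) := by
        intro hmem
        cases hc : rest.dropWhile (fun x => x == d) with
        | nil => rw [hc] at hmem; exact absurd hmem (List.not_mem_nil)
        | cons hd tl =>
            have hph := List.head?_dropWhile_not (fun x => x == d) rest
            rw [hc] at hph
            simp only [List.head?_cons] at hph
            have hhd_ne : hd ≠ d := by simpa using hph
            have hhd_mem : hd ∈ rest := hsubr.mem (by rw [hc]; simp)
            have h1 : d ≤ hd := hd_le hd hhd_mem
            rw [hc] at hmem
            rcases List.mem_cons.mp hmem with h | h
            · exact hhd_ne h.symm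
            · have h2 : hd ≤ d := (List.pairwise_cons.mp (hc ▸ hr_pair)).1 d h
              exact hhd_ne (le_antisymm h2 h1)
      have hof : PySem.Set.ofList (d :: rest)
          = d :: PySem.Set.ofList (rest.dropWhile (fun x => x == d)) := by
        conv_lhs => rw [← hrest]
        exact pv_ofList_run _ _ _ ht hdr
      have hcnt_d : (d :: rest).count d
          = (rest.takeWhile (fun x => x == d)).length + 1 := by
        rw [← hrest]
        simp only [List.count_cons, List.count_append]
        have h1 : (rest.takeWhile (fun x => x == d)).count d
            = (rest.takeWhile (fun x => x == d)).length :=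
          List.count_eq_length.mpr (fun b hb => (ht b hb).symm)
        have h2 : (rest.dropWhile (fun x => x == d)).count d = 0 :=
          List.count_eq_zero.mpr hdr
        simp [h1, h2]
      have hcnt_ne : ∀ k ∈ PySem.Set.ofList (rest.dropWhile (fun x => x == d)),
          (d :: rest).count k = (rest.dropWhile (fun x => x == d)).count k := by
        intro k hk
        have hk_mem : k ∈ rest.dropWhile (fun x => x == d) := (PySem.Set.mem_ofList _ _).mp hk
        have hk_ne : k ≠ d := fun he => hdr (he ▸ hk_mem)
        rw [← hrest]
        simp only [List.count_cons, List.count_append]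
        have h1 : (rest.takeWhile (fun x => x == d)).count k = 0 :=
          List.count_eq_zero.mpr (fun hkm => hk_ne (ht k hkm))
        simp [h1]
        exact fun h => hk_ne h.symm
      rw [pvRuns, hof, List.map_cons, ih hr_pair]
      refine List.cons_eq_cons.mpr ⟨?_, ?_⟩
      · have : ((rest.takeWhile (fun x => x == d)).length + 1 : Int)
            = ((d :: rest).count d : Int) := by exact_mod_cast hcnt_d.symm
        simpa using this
      · apply List.map_congr_left
        intro k hk
        rw [hcnt_ne k hk]

-- A's sorted counter items = B's run-length encoding of the sorted list
lemma pv_main (l : List Int) :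
    PySem.List.sorted ((PySem.Dict.counter l).items) (fun p => p.1) false
      = pvRuns (PySem.List.sorted l (fun x => x) false) := by
  have hperm : (PySem.List.sorted l (fun x => x) false).Perm l := PySem.List.sorted_perm _ _ _
  have hpair : (PySem.List.sorted l (fun x => x) false).Pairwise (· ≤ ·) := by
    simpa using PySem.List.sorted_pairwise l (fun x => x)
  rw [PySem.Dict.items_counter, pv_runs_sorted _ hpair]
  set s := PySem.List.sorted l (fun x => x) false with hsdef
  have hcount : ∀ k : Int, s.count k = l.count k := fun k => hperm.count_eq k
  have hmapeq : (PySem.Set.ofList s).map (fun k => (k, (s.count k : Int)))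
      = (PySem.Set.ofList s).map (fun k => (k, (l.count k : Int))) := by
    apply List.map_congr_left; intro k _; rw [hcount k]
  rw [hmapeq]
  apply PySem.List.sorted_eq_of_perm_of_pairwise_lt
  · apply List.Perm.map
    apply (List.perm_ext_iff_of_nodup (PySem.Set.nodup_ofList s) (PySem.Set.nodup_ofList l)).mpr
    intro a
    rw [PySem.Set.mem_ofList, PySem.Set.mem_ofList]
    exact hperm.mem_iff
  · have hsub := pv_ofList_sublist s
    have hle : (PySem.Set.ofList s).Pairwise (· ≤ ·) := List.Pairwise.sublist hsub hpair
    have hne : (PySem.Set.ofList s).Pairwise (· ≠ ·) := PySem.Set.nodup_ofList s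
    have hlt : (PySem.Set.ofList s).Pairwise (· < ·) :=
      (hle.and hne).imp (fun h => lt_of_le_of_ne h.1 h.2)
    simpa [List.pairwise_map] using hlt

-- ===== VERDICT (by name: the statement is the Claim_ definition above) =====
theorem degree_histogram_py_spec : Claim_equal_degree_histogram_py := by
  intro monomial_masks coeff_idx _ _
  unfold Spec_degree_histogram_py degree_histogram_py degree_histogram_py_alt
  simp only []
  rw [show (coeff_idx.foldl (fun (h : PySem.Dict Int Int) idx =>
      let deg := pvDeg monomial_masks idx
      h.insert deg (h.getD deg 0 + 1)) PySem.Dict.empty)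
      = PySem.Dict.counter (coeff_idx.map (fun idx => pvDeg monomial_masks idx)) from by
        rw [← PySem.Dict.foldl_insert_getD_add_one_eq_counter, List.foldl_map]]
  exact pv_main _
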